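-- pv_equiv track=rewrite | github.com/aceiii/ace-everybodycodes | 2024/03/part3.py | solve
-- ===== SOURCE A (Python) =====
-- def build_map(input):
--     rows = input.split("\n")
--     height = len(rows)
--     width = len(rows[0])
--     return rows, (width, height)
--
-- def neighbours(pos):
--     x, y = pos
--     yield (x + 1, y)
--     yield (x + 1, y + 1)
--     yield (x, y + 1)
--     yield (x - 1, y + 1)
--     yield (x - 1, y)
--     yield (x -1, y - 1)
--     yield (x, y - 1)
--     yield (x + 1, y - 1)
--
-- def dig_first_layer(dirt, dims):
--     width, height = dims
--     layer = []
--     for y in range(height):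
--         for x in range(width):
--             tile = dirt[y][x]
--             if tile == "#":
--                 pos = (x, y)
--                 layer.append((pos, 1))
--     return layer
--
-- def dig_secondary_layer(layer):
--     pos_set = set(pos for pos, _ in layer)
--     new_layer = []
--     for pos, height in layer:
--         neighbour_tiles = [next_pos for next_pos in neighbours(pos) if next_pos in pos_set]
--         if len(neighbour_tiles) == 8:
--             new_layer.append((pos, height + 1))
--     return new_layer
--
-- def solve(input):
--     dirt, dims = build_map(input)
--
--     layer = dig_first_layer(dirt, dims)
--     answer = len(layer)
--
--     while True:
--         layer = dig_secondary_layer(layer)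
--         count = len(layer)
--         if not count:
--             break
--         answer += count
--
--     return answer
-- ===== SOURCE B (Python) =====
-- def solve(input):
--     rows = input.split("\n")
--     height = len(rows)
--     width = len(rows[0])
--     total = 0
--     for y in range(height):
--         for x in range(width):
--             if rows[y][x] == "#":
--                 r = 1
--                 while all(
--                     0 <= x + dx < width and 0 <= y + dy < height
--                     and rows[y + dy][x + dx] == "#"
--                     for dy in range(-r, r + 1)
--                     for dx in range(-r, r + 1)
--                 ):
--                     r += 1
--                 total += r
--     return total
-- ===== Notes on version B (the rewrite author's own statement) =====
-- stated objective: simpler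
-- what changed: A repeatedly erodes a global layer list (rebuilding a position set and re-testing all 8 neighbours of every surviving cell each round) and sums the layer sizes; B computes, independently for each marked cell, its erosion depth as the largest all-marked Chebyshev square centred on it, and sums these depths in one pass over the grid, with no layer/set bookkeeping.
import Mathlib
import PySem

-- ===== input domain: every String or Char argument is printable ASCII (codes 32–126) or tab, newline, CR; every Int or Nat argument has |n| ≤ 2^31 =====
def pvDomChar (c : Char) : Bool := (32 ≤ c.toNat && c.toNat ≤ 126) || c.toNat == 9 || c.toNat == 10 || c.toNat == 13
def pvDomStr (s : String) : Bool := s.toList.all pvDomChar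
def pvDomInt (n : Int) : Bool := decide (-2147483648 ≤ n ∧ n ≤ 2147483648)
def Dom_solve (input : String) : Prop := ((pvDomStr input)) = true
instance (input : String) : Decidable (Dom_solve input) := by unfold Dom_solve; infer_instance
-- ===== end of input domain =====

-- B replaces A's iterated global layer erosion by an independent per-cell Chebyshev-square
-- depth computation summed in one pass (simpler: no layer/set bookkeeping).


-- ===== PORT A =====
-- dirt[y][x]; the default ' ' is unreachable under Pre_solve (every index is in range there)
def pvTile (dirt : List (List Char)) (x y : Int) : Char :=
  PySem.List.pyGetD (PySem.List.pyGetD dirt y []) x ' '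

def pvNeighbours (pos : Int × Int) : List (Int × Int) :=
  [(pos.1 + 1, pos.2), (pos.1 + 1, pos.2 + 1), (pos.1, pos.2 + 1), (pos.1 - 1, pos.2 + 1),
   (pos.1 - 1, pos.2), (pos.1 - 1, pos.2 - 1), (pos.1, pos.2 - 1), (pos.1 + 1, pos.2 - 1)]

def pvDigFirstLayer (dirt : List (List Char)) (width height : Int) : List ((Int × Int) × Int) :=
  (PySem.List.pyRange 0 height 1).foldl (fun layer y =>
    (PySem.List.pyRange 0 width 1).foldl (fun layer x =>
      if (pvTile dirt x y == '#') = true then layer ++ [((x, y), 1)] else layer) layer) []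

def pvDigSecondaryLayer (layer : List ((Int × Int) × Int)) : List ((Int × Int) × Int) :=
  let posSet : PySem.Set (Int × Int) := PySem.Set.ofList (layer.map Prod.fst)
  layer.foldl (fun newLayer ph =>
    let neighbourTiles := (pvNeighbours ph.1).filter (fun q => PySem.Set.contains posSet q)
    if (neighbourTiles.length == 8) = true then newLayer ++ [(ph.1, ph.2 + 1)] else newLayer) []

-- the 'while True' loop of A; the fuel (width + 1) is a provably sufficient bound (every layer
-- is empty after 'width' erosions), it only makes the recursion structural
def pvLoopA (fuel : Nat) (layer : List ((Int × Int) × Int)) (answer : Int) : Int :=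
  match fuel with
  | 0 => answer
  | f + 1 =>
    let layer' := pvDigSecondaryLayer layer
    let count : Int := layer'.length
    if count = 0 then answer else pvLoopA f layer' (answer + count)

def solve (input : String) : Int :=
  let rows := PySem.Chars.splitOn input.toList ['\n']
  let height : Int := rows.length
  let width : Int := ((PySem.List.pyGetD rows 0 []).length : Int)
  let layer := pvDigFirstLayer rows width height
  pvLoopA (width.toNat + 1) layer layer.length

-- ===== PORT B =====
-- '0 <= x+dx < width and 0 <= y+dy < height and rows[y+dy][x+dx] == "#"'
def pvGood (rows : List (List Char)) (width x y : Int) : Bool :=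
  decide (0 ≤ x) && decide (x < width) && decide (0 ≤ y) && decide (y < (rows.length : Int)) &&
    (PySem.List.pyGetD (PySem.List.pyGetD rows y []) x ' ' == '#')

-- the 'all(... for dy in range(-r, r+1) for dx in range(-r, r+1))' generator
def pvSquareAll (rows : List (List Char)) (width x y r : Int) : Bool :=
  (PySem.List.pyRange (-r) (r + 1) 1).all (fun dy =>
    (PySem.List.pyRange (-r) (r + 1) 1).all (fun dx => pvGood rows width (x + dx) (y + dy)))

-- the per-cell 'while' loop of B; the fuel width.toNat is a provably sufficient bound
-- (a square of radius ≥ width never fits), it only makes the recursion structural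
def pvDepth (fuel : Nat) (rows : List (List Char)) (width x y r : Int) : Int :=
  match fuel with
  | 0 => r
  | f + 1 => if pvSquareAll rows width x y r = true then pvDepth f rows width x y (r + 1) else r

def solve_alt (input : String) : Int :=
  let rows := PySem.Chars.splitOn input.toList ['\n']
  let height : Int := rows.length
  let width : Int := ((PySem.List.pyGetD rows 0 []).length : Int)
  (PySem.List.pyRange 0 height 1).foldl (fun total y =>
    (PySem.List.pyRange 0 width 1).foldl (fun total x =>
      if (PySem.List.pyGetD (PySem.List.pyGetD rows y []) x ' ' == '#') = true
      then total + pvDepth width.toNat rows width x y 1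
      else total) total) 0

-- ===== PRECONDITION & SPEC =====
-- Pre_solve: every line is at least as long as the first one — exactly the inputs on which
-- Python A (and B) returns; on a shorter later line both raise IndexError at rows[y][x].
def Pre_solve (input : String) : Prop :=
  ∀ row ∈ PySem.Chars.splitOn input.toList ['\n'],
    ((PySem.Chars.splitOn input.toList ['\n']).headD []).length ≤ row.length
instance (input : String) : Decidable (Pre_solve input) := by unfold Pre_solve; infer_instance

def pvWitness_solve : String := "###\n###\n###"

def Spec_solve (input : String) (out : Int) : Prop := out = solve_alt input
instance (input : String) (out : Int) : Decidable (Spec_solve input out) := by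
  unfold Spec_solve; infer_instance

-- ===== CLAIM (what is proved, stated in full; the proofs are below) =====
def Claim_equal_solve : Prop :=
  ∀ (input : String), Dom_solve input → Pre_solve input → Spec_solve input (solve input)

-- ===== LEMMAS AND PROOFS =====

-- row-major list of all grid coordinates
def pvCells (g : List (List Char)) (w : Int) : List (Int × Int) :=
  (PySem.List.pyRange 0 (g.length : Int) 1).flatMap (fun y =>
    (PySem.List.pyRange 0 w 1).map (fun x => (x, y)))

-- the layer A holds after r erosion rounds
def pvLayer (g : List (List Char)) (w : Int) (r : Int) : List ((Int × Int) × Int) :=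
  ((pvCells g w).filter (fun c => pvSquareAll g w c.1 c.2 r)).map (fun c => (c, r + 1))

-- number of cells surviving k erosion rounds
def pvN (g : List (List Char)) (w : Int) (k : Nat) : Nat :=
  ((pvCells g w).filter (fun c => pvSquareAll g w c.1 c.2 (k : Int))).length

theorem pvSquareAll_iff (g : List (List Char)) (w x y r : Int) :
    pvSquareAll g w x y r = true ↔
      ∀ u v : Int, x - r ≤ u → u ≤ x + r → y - r ≤ v → v ≤ y + r → pvGood g w u v = true := by
  simp only [pvSquareAll, List.all_eq_true, PySem.List.mem_pyRange_one]
  constructor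
  · intro hA u v h1 h2 h3 h4
    have := hA (v - y) ⟨by omega, by omega⟩ (u - x) ⟨by omega, by omega⟩
    rw [show x + (u - x) = u by ring, show y + (v - y) = v by ring] at this
    exact this
  · intro hB dy hdy dx hdx
    exact hB (x + dx) (y + dy) (by omega) (by omega) (by omega) (by omega)

theorem pvGood_bounds (g : List (List Char)) (w x y : Int) (h : pvGood g w x y = true) :
    0 ≤ x ∧ x < w ∧ 0 ≤ y ∧ y < (g.length : Int) := by
  simp only [pvGood, Bool.and_eq_true, decide_eq_true_eq] at h
  exact ⟨h.1.1.1.1, h.1.1.1.2, h.1.1.2, h.1.2⟩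

theorem pvGood_tile (g : List (List Char)) (w x y : Int) (h : pvGood g w x y = true) :
    (pvTile g x y == '#') = true := by
  simp only [pvGood, Bool.and_eq_true] at h
  exact h.2

theorem pvSquareAll_zero (g : List (List Char)) (w x y : Int) :
    pvSquareAll g w x y 0 = pvGood g w x y := by
  rcases h : pvGood g w x y with _ | _
  · rcases h2 : pvSquareAll g w x y 0 with _ | _
    · rfl
    · have := (pvSquareAll_iff g w x y 0).1 h2 x y (by omega) (by omega) (by omega) (by omega)
      rw [h] at this; cases this
  · rw [(pvSquareAll_iff g w x y 0).2]
    intro u v h1 h2 h3 h4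
    have hu : u = x := by omega
    have hv : v = y := by omega
    rw [hu, hv]; exact h

theorem pvSquareAll_mono (g : List (List Char)) (w x y : Int) {r r' : Int}
    (_h0 : 0 ≤ r) (hrr : r ≤ r') (h : pvSquareAll g w x y r' = true) :
    pvSquareAll g w x y r = true := by
  rw [pvSquareAll_iff] at h ⊢
  intro u v h1 h2 h3 h4
  exact h u v (by omega) (by omega) (by omega) (by omega)

theorem pvSquareAll_center (g : List (List Char)) (w x y r : Int) (h0 : 0 ≤ r)
    (h : pvSquareAll g w x y r = true) : pvGood g w x y = true := by
  rw [pvSquareAll_iff] at h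
  exact h x y (by omega) (by omega) (by omega) (by omega)

theorem pvSquareAll_lt (g : List (List Char)) (w x y r : Int) (h0 : 0 ≤ r)
    (h : pvSquareAll g w x y r = true) : r < w := by
  rw [pvSquareAll_iff] at h
  have h1 := pvGood_bounds g w x y (h x y (by omega) (by omega) (by omega) (by omega))
  have h2 := pvGood_bounds g w (x - r) y (h (x - r) y (by omega) (by omega) (by omega) (by omega))
  omega

-- the geometric heart: a (r+1)-square is all-good iff the r-squares of the cell and of
-- its 8 neighbours are
theorem pvSquareAll_succ (g : List (List Char)) (w x y r : Int) (h0 : 0 ≤ r) :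
    pvSquareAll g w x y (r + 1) = true ↔
      (pvSquareAll g w x y r = true ∧
        ∀ q ∈ pvNeighbours (x, y), pvSquareAll g w q.1 q.2 r = true) := by
  constructor
  · intro h
    refine ⟨pvSquareAll_mono g w x y h0 (by omega) h, ?_⟩
    intro q hq
    simp only [pvNeighbours, List.mem_cons, List.not_mem_nil, or_false] at hq
    rw [pvSquareAll_iff] at h ⊢
    rcases hq with rfl | rfl | rfl | rfl | rfl | rfl | rfl | rfl <;>
      · intro u v h1 h2 h3 h4
        simp only at h1 h2 h3 h4
        exact h u v (by omega) (by omega) (by omega) (by omega)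
  · rintro ⟨hc, hn⟩
    have n1 := hn (x + 1, y) (by simp [pvNeighbours])
    have n2 := hn (x + 1, y + 1) (by simp [pvNeighbours])
    have n3 := hn (x, y + 1) (by simp [pvNeighbours])
    have n4 := hn (x - 1, y + 1) (by simp [pvNeighbours])
    have n5 := hn (x - 1, y) (by simp [pvNeighbours])
    have n6 := hn (x - 1, y - 1) (by simp [pvNeighbours])
    have n7 := hn (x, y - 1) (by simp [pvNeighbours])
    have n8 := hn (x + 1, y - 1) (by simp [pvNeighbours])
    simp only at n1 n2 n3 n4 n5 n6 n7 n8
    rw [pvSquareAll_iff] at hc n1 n2 n3 n4 n5 n6 n7 n8 ⊢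
    intro u v h1 h2 h3 h4
    by_cases hu : u < x - r
    · by_cases hv : v < y - r
      · exact n6 u v (by omega) (by omega) (by omega) (by omega)
      · by_cases hv' : y + r < v
        · exact n4 u v (by omega) (by omega) (by omega) (by omega)
        · exact n5 u v (by omega) (by omega) (by omega) (by omega)
    · by_cases hu' : x + r < u
      · by_cases hv : v < y - r
        · exact n8 u v (by omega) (by omega) (by omega) (by omega)
        · by_cases hv' : y + r < v
          · exact n2 u v (by omega) (by omega) (by omega) (by omega)
          · exact n1 u v (by omega) (by omega) (by omega) (by omega)
      · by_cases hv : v < y - r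
        · exact n7 u v (by omega) (by omega) (by omega) (by omega)
        · by_cases hv' : y + r < v
          · exact n3 u v (by omega) (by omega) (by omega) (by omega)
          · exact hc u v (by omega) (by omega) (by omega) (by omega)

theorem pvMem_cells (g : List (List Char)) (w : Int) (c : Int × Int) :
    c ∈ pvCells g w ↔ 0 ≤ c.1 ∧ c.1 < w ∧ 0 ≤ c.2 ∧ c.2 < (g.length : Int) := by
  obtain ⟨x, y⟩ := c
  simp only [pvCells, List.mem_flatMap, List.mem_map, PySem.List.mem_pyRange_one, Prod.mk.injEq]
  constructor
  · rintro ⟨y', hy', x', hx', rfl, rfl⟩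
    exact ⟨by omega, by omega, by omega, by omega⟩
  · rintro ⟨h1, h2, h3, h4⟩
    exact ⟨y, ⟨by omega, by omega⟩, x, ⟨by omega, by omega⟩, rfl, rfl⟩

theorem pvNodup_cells (g : List (List Char)) (w : Int) : (pvCells g w).Nodup := by
  rw [pvCells, List.nodup_flatMap]
  constructor
  · intro y _
    exact (PySem.List.nodup_pyRange_one 0 w).map
      (fun a b h => by simpa using h)
  · refine (PySem.List.pairwise_lt_pyRange_one (a := 0) (b := (g.length : Int))).imp ?_
    intro a b hab
    simp only [Function.onFun, List.disjoint_left]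
    rintro c hc1 hc2
    simp only [List.mem_map] at hc1 hc2
    obtain ⟨x1, _, rfl⟩ := hc1
    obtain ⟨x2, _, h2⟩ := hc2
    have h3 := congrArg Prod.snd h2
    simp only at h3
    omega

theorem pvGood_mem_cells (g : List (List Char)) (w x y : Int) (h : pvGood g w x y = true) :
    (x, y) ∈ pvCells g w := by
  rw [pvMem_cells]
  have := pvGood_bounds g w x y h
  exact ⟨this.1, this.2.1, this.2.2.1, this.2.2.2⟩

theorem pvGood_eq_tile (g : List (List Char)) (w x y : Int)
    (h1 : 0 ≤ x) (h2 : x < w) (h3 : 0 ≤ y) (h4 : y < (g.length : Int)) :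
    pvGood g w x y = (pvTile g x y == '#') := by
  simp [pvGood, pvTile, h1, h2, h3, h4]

theorem pvLayer_flat (g : List (List Char)) (w r : Int) :
    pvLayer g w r =
      (PySem.List.pyRange 0 (g.length : Int) 1).flatMap (fun y =>
        ((PySem.List.pyRange 0 w 1).filter (fun x => pvSquareAll g w x y r)).map
          (fun x => ((x, y), r + 1))) := by
  unfold pvLayer pvCells
  rw [List.filter_flatMap, List.map_flatMap]
  simp only [List.filter_map, List.map_map]
  rfl

theorem pvDigFirst_eq (g : List (List Char)) (w : Int) :
    pvDigFirstLayer g w (g.length : Int) = pvLayer g w 0 := by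
  have step1 : pvDigFirstLayer g w (g.length : Int) =
      (PySem.List.pyRange 0 (g.length : Int) 1).foldl (fun layer y =>
        layer ++ ((PySem.List.pyRange 0 w 1).filter (fun x => pvSquareAll g w x y 0)).map
          (fun x => ((x, y), (0 : Int) + 1))) [] := by
    unfold pvDigFirstLayer
    refine PySem.List.foldl_congr_mem _ _ _ _ ?_
    intro acc y hy
    rw [PySem.List.foldl_append_if (fun x => pvTile g x y == '#')
      (fun x => ((x, y), (1 : Int))) _ acc]
    rw [List.filter_congr (q := fun x => pvSquareAll g w x y 0) ?_]
    · norm_num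
    · intro x hx
      rw [PySem.List.mem_pyRange_one] at hx hy
      show (pvTile g x y == '#') = pvSquareAll g w x y 0
      rw [pvSquareAll_zero]
      exact (pvGood_eq_tile g w x y (by omega) (by omega) (by omega) (by omega)).symm
  rw [step1, PySem.List.foldl_append_eq_flatMap, List.nil_append, pvLayer_flat]

theorem pvContains_filter (g : List (List Char)) (w r : Int) (hr : 0 ≤ r) (q : Int × Int) :
    PySem.Set.contains ((pvCells g w).filter (fun c => pvSquareAll g w c.1 c.2 r)) q =
      pvSquareAll g w q.1 q.2 r := by
  rcases hS : pvSquareAll g w q.1 q.2 r with _ | _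
  · rw [Bool.eq_false_iff]
    intro h
    have hm := (PySem.Set.contains_iff _ _).1 h
    rw [List.mem_filter] at hm
    rw [hS] at hm
    exact absurd hm.2 (by simp)
  · refine (PySem.Set.contains_iff _ _).2 ?_
    rw [List.mem_filter]
    refine ⟨?_, hS⟩
    have hg : pvGood g w q.1 q.2 = true := pvSquareAll_center g w q.1 q.2 r hr hS
    exact pvGood_mem_cells g w q.1 q.2 hg

theorem pvCond_succ (g : List (List Char)) (w r : Int) (hr : 0 ≤ r) (c : Int × Int) :
    ((((pvNeighbours c).filter (fun q => pvSquareAll g w q.1 q.2 r)).length == 8) &&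
      pvSquareAll g w c.1 c.2 r) =
      pvSquareAll g w c.1 c.2 (r + 1) := by
  obtain ⟨x, y⟩ := c
  rcases hS : pvSquareAll g w (x, y).1 (x, y).2 (r + 1) with _ | _
  · rw [Bool.eq_false_iff]
    intro h
    rw [Bool.and_eq_true, beq_iff_eq] at h
    have hall : ∀ q ∈ pvNeighbours (x, y), pvSquareAll g w q.1 q.2 r = true := by
      rw [← List.length_filter_eq_length_iff]
      rw [h.1]
      rfl
    have := (pvSquareAll_succ g w x y r hr).2 ⟨h.2, hall⟩
    simp only at hS this
    rw [hS] at this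
    cases this
  · have h := (pvSquareAll_succ g w x y r hr).1 (by simpa using hS)
    rw [Bool.and_eq_true, beq_iff_eq]
    refine ⟨?_, h.1⟩
    rw [List.length_filter_eq_length_iff.2 h.2]
    rfl

theorem pvDigSecondary_eq (g : List (List Char)) (w r : Int) (hr : 0 ≤ r) :
    pvDigSecondaryLayer (pvLayer g w r) = pvLayer g w (r + 1) := by
  simp only [pvDigSecondaryLayer, pvLayer, List.map_map]
  have hfst : ((pvCells g w).filter (fun c => pvSquareAll g w c.1 c.2 r)).map
      (Prod.fst ∘ fun c => (c, r + 1)) =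
      (pvCells g w).filter (fun c => pvSquareAll g w c.1 c.2 r) := by
    simp [Function.comp_def]
  rw [hfst]
  rw [PySem.Set.ofList_eq_self_of_nodup _ ((pvNodup_cells g w).filter _)]
  rw [PySem.List.foldl_append_if]
  rw [List.nil_append, List.filter_map, List.map_map]
  simp only [Function.comp_def]
  simp only [pvContains_filter g w r hr]
  rw [List.filter_filter]
  rw [List.filter_congr (q := fun c => pvSquareAll g w c.1 c.2 (r + 1))
    (fun c _ => pvCond_succ g w r hr c)]

theorem pvLayer_length (g : List (List Char)) (w : Int) (k : Nat) :
    (pvLayer g w (k : Int)).length = pvN g w k := by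
  simp [pvLayer, pvN]

theorem pvN_zero_mono (g : List (List Char)) (w : Int) {k j : Nat}
    (h : pvN g w k = 0) (hkj : k ≤ j) : pvN g w j = 0 := by
  simp only [pvN, List.length_eq_zero_iff, List.filter_eq_nil_iff] at h ⊢
  intro c hc hs
  exact h c hc (pvSquareAll_mono g w c.1 c.2 (by omega) (by exact_mod_cast hkj) hs)

theorem pvN_big (g : List (List Char)) (w : Int) {k : Nat} (hk : w ≤ (k : Int)) :
    pvN g w k = 0 := by
  simp only [pvN, List.length_eq_zero_iff, List.filter_eq_nil_iff]
  intro c hc hs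
  have := pvSquareAll_lt g w c.1 c.2 (k : Int) (by omega) hs
  omega

theorem pvLoopA_eq (g : List (List Char)) (w : Int) (hw : 0 ≤ w) :
    ∀ (fuel k : Nat) (ans : Int), w.toNat + 1 ≤ k + fuel →
      pvLoopA fuel (pvLayer g w (k : Int)) ans =
        ans + ∑ j ∈ Finset.Ico (k + 1) (w.toNat + 1), (pvN g w j : Int) := by
  intro fuel
  induction fuel with
  | zero =>
    intro k ans hk
    rw [Finset.Ico_eq_empty (by omega)]
    simp [pvLoopA]
  | succ f ih =>
    intro k ans hk
    simp only [pvLoopA]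
    rw [pvDigSecondary_eq g w (k : Int) (by omega)]
    have hcast : ((k : Int) + 1) = ((k + 1 : Nat) : Int) := by push_cast; ring
    rw [hcast, pvLayer_length]
    by_cases h0 : pvN g w (k + 1) = 0
    · rw [if_pos (by exact_mod_cast h0)]
      rw [Finset.sum_eq_zero, add_zero]
      intro j hj
      simp only [Finset.mem_Ico] at hj
      rw [pvN_zero_mono g w h0 hj.1]
      rfl
    · have hlt : k + 1 < w.toNat + 1 := by
        by_contra hge
        exact h0 (pvN_big g w (by omega))
      rw [if_neg (by exact_mod_cast h0)]
      rw [ih (k + 1) _ (by omega)]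
      rw [Finset.sum_eq_sum_Ico_succ_bot hlt]
      ring

-- ===== B-side characterisation =====

-- swap a list sum of finset sums
theorem pvSum_swap {α : Type} (l : List α) (s : Finset ℕ) (f : ℕ → α → ℤ) :
    (l.map (fun c => ∑ k ∈ s, f k c)).sum = ∑ k ∈ s, (l.map (fun c => f k c)).sum := by
  induction l with
  | nil => simp
  | cons a t ih => simp [ih, Finset.sum_add_distrib]

theorem pvSum_flatMap {α β : Type} (l : List α) (gf : α → List β) (f : β → ℤ) :
    ((l.flatMap gf).map f).sum = (l.map (fun a => ((gf a).map f).sum)).sum := by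
  induction l with
  | nil => simp
  | cons a t ih => simp [ih]

-- per-cell: B's depth equals the number of erosion rounds the cell survives
theorem pvCell_depth (g : List (List Char)) (w : Int) (hw : 0 ≤ w) (x y : Int)
    (hc : (x, y) ∈ pvCells g w) :
    (if (PySem.List.pyGetD (PySem.List.pyGetD g y []) x ' ' == '#') = true
      then pvDepth w.toNat g w x y 1 else 0) =
      ∑ k ∈ Finset.range (w.toNat + 1),
        (if pvSquareAll g w x y (k : Int) = true then (1 : ℤ) else 0) := by
  have hb := (pvMem_cells g w (x, y)).1 hc
  simp only at hb
  by_cases ht : (PySem.List.pyGetD (PySem.List.pyGetD g y []) x ' ' == '#') = true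
  · have hgood : pvGood g w x y = true := by
      simp only [pvGood, Bool.and_eq_true, decide_eq_true_eq]
      exact ⟨⟨⟨⟨hb.1, hb.2.1⟩, hb.2.2.1⟩, hb.2.2.2⟩, ht⟩
    have hwt : ((w.toNat : Nat) : Int) = w := Int.toNat_of_nonneg hw
    have hex : ∃ n : Nat, pvSquareAll g w x y (n : Int) = false := by
      refine ⟨w.toNat, Bool.eq_false_iff.2 (fun h => ?_)⟩
      have := pvSquareAll_lt g w x y _ (by positivity) h
      omega
    have hkey : ∀ k : Nat, (pvSquareAll g w x y (k : Int) = true ↔ k < Nat.find hex) := by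
      intro k
      constructor
      · intro h
        by_contra hge
        have hge' : Nat.find hex ≤ k := by omega
        have hm := pvSquareAll_mono g w x y (r := (Nat.find hex : Int)) (r' := (k : Int))
          (by positivity) (by exact_mod_cast hge') h
        rw [Nat.find_spec hex] at hm
        cases hm
      · intro h
        have := Nat.find_min hex h
        simpa using this
    have hl1 : 1 ≤ Nat.find hex := by
      have h0 : pvSquareAll g w x y 0 = true := by rw [pvSquareAll_zero]; exact hgood
      have := (hkey 0).1 (by simpa using h0)
      omega
    have hlW : Nat.find hex ≤ w.toNat := Nat.find_min' hex (Bool.eq_false_iff.2 (fun h => by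
      have := pvSquareAll_lt g w x y _ (by positivity) h
      omega))
    rw [if_pos ht]
    have hrun : ∀ (f : Nat) (r : Int), 1 ≤ r → r ≤ (Nat.find hex : Int) →
        (Nat.find hex : Int) < r + f → pvDepth f g w x y r = (Nat.find hex : Int) := by
      intro f
      induction f with
      | zero =>
        intro r h1 h2 h3
        simp only [pvDepth]
        omega
      | succ f ih =>
        intro r h1 h2 h3
        simp only [pvDepth]
        have hcast : ((r.toNat : Nat) : Int) = r := Int.toNat_of_nonneg (by omega)
        by_cases hs : pvSquareAll g w x y r = true
        · rw [if_pos hs]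
          have hlt : r.toNat < Nat.find hex := (hkey r.toNat).1 (by rw [hcast]; exact hs)
          exact ih (r + 1) (by omega) (by omega) (by omega)
        · rw [if_neg hs]
          have hnlt : ¬ r.toNat < Nat.find hex := fun hlt => hs (by
            rw [← hcast]
            exact (hkey r.toNat).2 hlt)
          omega
    rw [hrun w.toNat 1 (le_refl 1) (by exact_mod_cast hl1) (by omega)]
    have hsum : ∑ k ∈ Finset.range (w.toNat + 1),
        (if pvSquareAll g w x y (k : Int) = true then (1 : ℤ) else 0) =
        ∑ k ∈ Finset.range (w.toNat + 1), (if k < Nat.find hex then (1 : ℤ) else 0) := by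
      refine Finset.sum_congr rfl (fun k _ => ?_)
      by_cases h : k < Nat.find hex
      · rw [if_pos ((hkey k).2 h), if_pos h]
      · rw [if_neg (fun hh => h ((hkey k).1 hh)), if_neg h]
    rw [hsum, Finset.sum_boole]
    have hfil : {k ∈ Finset.range (w.toNat + 1) | k < Nat.find hex} =
        Finset.range (Nat.find hex) := by
      ext k
      simp only [Finset.mem_filter, Finset.mem_range]
      omega
    rw [hfil, Finset.card_range]
  · rw [if_neg ht]
    symm
    apply Finset.sum_eq_zero
    intro k _
    rw [if_neg]
    intro hs
    have hgood := pvSquareAll_center g w x y _ (by positivity) hs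
    exact ht (pvGood_tile g w x y hgood)

theorem pvCore (g : List (List Char)) (w : Int) (hw : 0 ≤ w) :
    pvLoopA (w.toNat + 1) (pvDigFirstLayer g w (g.length : Int))
        ((pvDigFirstLayer g w (g.length : Int)).length : Int) =
      (PySem.List.pyRange 0 (g.length : Int) 1).foldl (fun total y =>
        (PySem.List.pyRange 0 w 1).foldl (fun total x =>
          if (PySem.List.pyGetD (PySem.List.pyGetD g y []) x ' ' == '#') = true
          then total + pvDepth w.toNat g w x y 1
          else total) total) 0 := by
  -- A's side: sum of the layer sizes
  have hA : pvLoopA (w.toNat + 1) (pvDigFirstLayer g w (g.length : Int))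
      ((pvDigFirstLayer g w (g.length : Int)).length : Int) =
      ∑ j ∈ Finset.range (w.toNat + 1), (pvN g w j : Int) := by
    rw [pvDigFirst_eq]
    have h0 : pvLayer g w 0 = pvLayer g w ((0 : Nat) : Int) := by norm_num
    rw [h0, pvLayer_length, pvLoopA_eq g w hw (w.toNat + 1) 0 _ (by omega)]
    rw [Finset.range_eq_Ico,
      Finset.sum_eq_sum_Ico_succ_bot (show 0 < w.toNat + 1 by omega)
        (fun j => (pvN g w j : ℤ))]
  rw [hA]
  -- B's side: fold to a sum over all cells
  have hinner : ∀ (t : Int) (y : Int),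
      (PySem.List.pyRange 0 w 1).foldl (fun total x =>
        if (PySem.List.pyGetD (PySem.List.pyGetD g y []) x ' ' == '#') = true
        then total + pvDepth w.toNat g w x y 1
        else total) t =
      t + ((PySem.List.pyRange 0 w 1).map (fun x =>
        if (PySem.List.pyGetD (PySem.List.pyGetD g y []) x ' ' == '#') = true
        then pvDepth w.toNat g w x y 1 else 0)).sum := by
    intro t y
    rw [PySem.List.foldl_congr_mem _ _ (fun total x => total +
      (if (PySem.List.pyGetD (PySem.List.pyGetD g y []) x ' ' == '#') = true
        then pvDepth w.toNat g w x y 1 else 0)) t (by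
        intro acc x _
        by_cases h : (PySem.List.pyGetD (PySem.List.pyGetD g y []) x ' ' == '#') = true <;>
          simp [h])]
    exact PySem.List.foldl_add _ _ t
  have houter : (PySem.List.pyRange 0 (g.length : Int) 1).foldl (fun total y =>
      (PySem.List.pyRange 0 w 1).foldl (fun total x =>
        if (PySem.List.pyGetD (PySem.List.pyGetD g y []) x ' ' == '#') = true
        then total + pvDepth w.toNat g w x y 1
        else total) total) 0 =
      ((PySem.List.pyRange 0 (g.length : Int) 1).map (fun y =>
        ((PySem.List.pyRange 0 w 1).map (fun x =>
          if (PySem.List.pyGetD (PySem.List.pyGetD g y []) x ' ' == '#') = true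
          then pvDepth w.toNat g w x y 1 else 0)).sum)).sum := by
    rw [PySem.List.foldl_congr_mem _ _ (fun total y => total +
      ((PySem.List.pyRange 0 w 1).map (fun x =>
        if (PySem.List.pyGetD (PySem.List.pyGetD g y []) x ' ' == '#') = true
        then pvDepth w.toNat g w x y 1 else 0)).sum) 0 (by
        intro acc y _
        exact hinner acc y)]
    rw [PySem.List.foldl_add, zero_add]
  rw [houter]
  -- fold the two maps into one map over all cells
  have hcells : ((pvCells g w).map (fun c =>
      if (PySem.List.pyGetD (PySem.List.pyGetD g c.2 []) c.1 ' ' == '#') = true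
      then pvDepth w.toNat g w c.1 c.2 1 else 0)).sum =
      ((PySem.List.pyRange 0 (g.length : Int) 1).map (fun y =>
        ((PySem.List.pyRange 0 w 1).map (fun x =>
          if (PySem.List.pyGetD (PySem.List.pyGetD g y []) x ' ' == '#') = true
          then pvDepth w.toNat g w x y 1 else 0)).sum)).sum := by
    rw [pvCells, pvSum_flatMap]
    simp only [List.map_map, Function.comp_def]
  rw [← hcells]
  -- per cell, B's depth is the number of surviving rounds; then swap the two sums
  rw [List.map_congr_left (l := pvCells g w)
    (g := fun c => ∑ k ∈ Finset.range (w.toNat + 1),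
      (if pvSquareAll g w c.1 c.2 (k : Int) = true then (1 : ℤ) else 0))
    (fun c hcmem => by
      obtain ⟨x, y⟩ := c
      exact pvCell_depth g w hw x y hcmem)]
  rw [pvSum_swap]
  refine Finset.sum_congr rfl ?_
  intro k _
  rw [PySem.List.sum_map_ite_one_zero (fun c => pvSquareAll g w c.1 c.2 (k : Int)) (pvCells g w)]
  rw [List.countP_eq_length_filter]
  rfl

-- ===== VERDICT (by name: the statement is the Claim_ definition above) =====
theorem solve_spec : Claim_equal_solve := by
  intro input _ _
  unfold Spec_solve solve solve_alt
  exact pvCore (PySem.Chars.splitOn input.toList ['\n'])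
    ((PySem.List.pyGetD (PySem.Chars.splitOn input.toList ['\n']) 0 []).length : Int)
    (by positivity)
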